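-- pv_equiv track=rewrite | github.com/kanjieater/SubPlz | subplz/align.py | find_index_with_non_punctuation_end
-- ===== SOURCE A (Python) =====
-- from typing import List
--
-- def find_index_with_non_punctuation_end(indices: List[int]) -> List[int]:
--     """Removes sequential indices, keeping only the last occurrence in a sequence."""
--     if not indices:
--         return []
--     result = []
--     for i in range(len(indices) - 1):
--         if indices[i] != indices[i + 1] - 1:
--             result.append(indices[i])
--     result.append(indices[-1])
--     return result
-- ===== SOURCE B (Python) =====
-- from typing import List
--
-- def find_index_with_non_punctuation_end(indices: List[int]) -> List[int]:
--     """Group maximal consecutive runs by the invariant key v - i and keep the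
--     last value of each group."""
--     groups = []  # list of [key, last_value] for each maximal consecutive run
--     for i, v in enumerate(indices):
--         k = v - i
--         if groups and groups[-1][0] == k:
--             groups[-1][1] = v
--         else:
--             groups.append([k, v])
--     return [last for _, last in groups]
-- ===== Notes on version B (the rewrite author's own statement) =====
-- stated objective: alternative
-- what changed: B groups the list into maximal consecutive runs via the invariant key v - i (groupby-style), mutating the current group's last value, then maps out each group's last element, instead of A's index loop with a pairwise look-ahead test.
import Mathlib
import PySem

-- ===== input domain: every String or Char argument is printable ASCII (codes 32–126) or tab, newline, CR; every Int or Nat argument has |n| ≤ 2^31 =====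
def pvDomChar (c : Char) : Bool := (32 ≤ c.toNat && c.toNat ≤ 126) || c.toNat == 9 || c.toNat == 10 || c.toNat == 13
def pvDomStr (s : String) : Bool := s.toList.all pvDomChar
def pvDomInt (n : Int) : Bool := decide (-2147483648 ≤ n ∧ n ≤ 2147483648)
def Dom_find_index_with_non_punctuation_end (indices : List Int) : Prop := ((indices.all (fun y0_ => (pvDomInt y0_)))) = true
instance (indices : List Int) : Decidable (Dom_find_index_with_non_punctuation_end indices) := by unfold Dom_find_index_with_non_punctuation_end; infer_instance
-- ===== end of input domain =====

-- B groups the list into maximal consecutive runs via the invariant key v - i and keeps each run's last value, instead of A's index loop with a pairwise look-ahead test (alternative decomposition, same cost).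

-- ===== PORT A =====
def find_index_with_non_punctuation_end (indices : List Int) : List Int :=
  if indices = [] then []
  else
    let result := (PySem.List.pyRange 0 ((indices.length : Int) - 1) 1).foldl
      (fun acc i =>
        if PySem.List.pyGetD indices i 0 ≠ PySem.List.pyGetD indices (i + 1) 0 - 1
        then acc ++ [PySem.List.pyGetD indices i 0] else acc) []
    result ++ [PySem.List.pyGetD indices (-1) 0]

-- ===== PORT B =====
-- one loop step of Source B: extend the current run (groups[-1][1] = v, i.e. dropLast ++ [(k, v)]) or open a new one
def find_index_with_non_punctuation_end_altStep (groups : List (Int × Int)) (iv : Int × Int) : List (Int × Int) :=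
  let k := iv.2 - iv.1
  match groups.getLast? with
  | some g => if g.1 = k then groups.dropLast ++ [(k, iv.2)] else groups ++ [(k, iv.2)]
  | none => groups ++ [(k, iv.2)]

def find_index_with_non_punctuation_end_alt (indices : List Int) : List Int :=
  ((PySem.List.enumerate indices 0).foldl find_index_with_non_punctuation_end_altStep []).map (·.2)

-- ===== PRECONDITION & SPEC =====
def Spec_find_index_with_non_punctuation_end (indices : List Int) (out : List Int) : Prop := out = find_index_with_non_punctuation_end_alt indices
instance (indices : List Int) (out : List Int) : Decidable (Spec_find_index_with_non_punctuation_end indices out) := by unfold Spec_find_index_with_non_punctuation_end; infer_instance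

-- ===== CLAIM (what is proved, stated in full; the proofs are below) =====
def Claim_equal_find_index_with_non_punctuation_end : Prop := ∀ (indices : List Int), Dom_find_index_with_non_punctuation_end indices → Spec_find_index_with_non_punctuation_end indices (find_index_with_non_punctuation_end indices)

-- ===== LEMMAS AND PROOFS =====

-- common reference value: keep each element whose successor is not itself + 1, plus the last element
def pvPw : List Int → List Int
  | [] => []
  | [a] => [a]
  | a :: b :: t => (if a ≠ b - 1 then [a] else []) ++ pvPw (b :: t)

-- A's loop (over Nat indices) computes pvPw, for any accumulator
lemma pvA_loop (l : List Int) (a : Int) (init : List Int) :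
    (List.range ((a :: l).length - 1)).foldl
      (fun acc k => if (a :: l).getD k 0 ≠ (a :: l).getD (k + 1) 0 - 1
                    then acc ++ [(a :: l).getD k 0] else acc) init
      ++ [(a :: l).getLast (by simp)]
    = init ++ pvPw (a :: l) := by
  induction l generalizing a init with
  | nil => simp [pvPw]
  | cons b t ih =>
    have hr : (a :: b :: t).length - 1 = t.length + 1 := by simp
    rw [hr, List.range_succ_eq_map, List.foldl_cons, List.foldl_map]
    simp only [List.getD_cons_succ, List.getD_cons_zero]
    have hlast : (a :: b :: t).getLast (by simp) = (b :: t).getLast (by simp) := by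
      simp [List.getLast]
    rw [hlast]
    have hih := ih b (if a ≠ b - 1 then init ++ [a] else init)
    simp only [List.getD_cons_succ] at hih
    simp only [List.length_cons, Nat.add_sub_cancel] at hih ⊢
    rw [hih]
    by_cases h : a ≠ b - 1 <;> simp [pvPw, h]

-- B's fold invariant: the open run's key equals (last value) - (next index) + 1
lemma pvB_inv (l : List Int) (s v : Int) (g : List (Int × Int)) :
    ((PySem.List.enumerate l s).foldl find_index_with_non_punctuation_end_altStep
        (g ++ [(v - s + 1, v)])).map (·.2)
    = g.map (·.2) ++ pvPw (v :: l) := by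
  induction l generalizing s v g with
  | nil => simp [PySem.List.enumerate, pvPw]
  | cons a t ih =>
    rw [PySem.List.enumerate_cons, List.foldl_cons]
    by_cases h : a = v + 1
    · have hstep : find_index_with_non_punctuation_end_altStep (g ++ [(v - s + 1, v)]) (s, a)
          = g ++ [(a - (s + 1) + 1, a)] := by
        have hk : v - s + 1 = a - s := by omega
        have ha : a - s = a - (s + 1) + 1 := by ring
        simp [find_index_with_non_punctuation_end_altStep, hk, ← ha]
      rw [hstep, ih (s + 1) a g]
      have : ¬ v ≠ a - 1 := by omega
      simp [pvPw, this]
    · have hstep : find_index_with_non_punctuation_end_altStep (g ++ [(v - s + 1, v)]) (s, a)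
          = (g ++ [(v - s + 1, v)]) ++ [(a - (s + 1) + 1, a)] := by
        have hk : v - s + 1 ≠ a - s := by omega
        have ha : a - s = a - (s + 1) + 1 := by ring
        simp [find_index_with_non_punctuation_end_altStep, hk, ← ha]
      rw [hstep, ih (s + 1) a (g ++ [(v - s + 1, v)])]
      have : v ≠ a - 1 := by omega
      simp [pvPw, this]

-- B computes pvPw
lemma pvB_eq (l : List Int) : find_index_with_non_punctuation_end_alt l = pvPw l := by
  cases l with
  | nil => rfl
  | cons a t =>
    unfold find_index_with_non_punctuation_end_alt
    rw [PySem.List.enumerate_cons, List.foldl_cons]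
    have hstep : find_index_with_non_punctuation_end_altStep [] (0, a) = [] ++ [(a - 1 + 1, a)] := by
      have : a - 0 = a - 1 + 1 := by ring
      simp [find_index_with_non_punctuation_end_altStep, this]
    rw [hstep, show (0:Int) + 1 = 1 from by norm_num, pvB_inv t 1 a []]
    simp

-- A computes pvPw
lemma pvA_eq (l : List Int) : find_index_with_non_punctuation_end l = pvPw l := by
  cases l with
  | nil => rfl
  | cons a t =>
    unfold find_index_with_non_punctuation_end
    simp only [if_neg (List.cons_ne_nil a t)]
    rw [PySem.List.pyRange_one, List.foldl_map,
      PySem.List.pyGetD_neg_one (xs := a :: t) (h := List.cons_ne_nil a t)]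
    have hlen : ((((a :: t).length : Int) - 1 - 0)).toNat = (a :: t).length - 1 := by
      simp
    rw [hlen]
    have hfun : (fun (acc : List Int) (k : Nat) =>
        if PySem.List.pyGetD (a :: t) (0 + (k : Int)) 0 ≠ PySem.List.pyGetD (a :: t) ((0 + (k : Int)) + 1) 0 - 1
        then acc ++ [PySem.List.pyGetD (a :: t) (0 + (k : Int)) 0] else acc)
        = (fun (acc : List Int) (k : Nat) =>
        if (a :: t).getD k 0 ≠ (a :: t).getD (k + 1) 0 - 1
        then acc ++ [(a :: t).getD k 0] else acc) := by
      funext acc k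
      simp only [zero_add, ← Nat.cast_add_one, PySem.List.pyGetD_natCast]
    rw [hfun]
    exact pvA_loop t a []

-- ===== VERDICT (by name: the statement is the Claim_ definition above) =====
theorem find_index_with_non_punctuation_end_spec : Claim_equal_find_index_with_non_punctuation_end := by
  intro indices _
  unfold Spec_find_index_with_non_punctuation_end
  rw [pvA_eq, pvB_eq]
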